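-- pv_equiv track=rewrite | github.com/foolishzhao/leetcode | python3/weekly-contest-186/_1422_Maximum_Score_After_Splitting_a_String/main.py | maxScore3
-- ===== SOURCE A (Python) =====
-- def maxScore3(s: str) -> int:
--     res, c0, c1 = 0, 0, s.count('1')
--     for i in range(len(s) - 1):
--         if s[i] == '0':
--             c0 += 1
--         else:
--             c1 -= 1
--         res = max(res, c0 + c1)
--     return res
-- ===== SOURCE B (Python) =====
-- def maxScore3(s: str) -> int:
--     ones = s.count('1')
--     return max([0] + [ones + 2 * s[:j].count('0') - j for j in range(1, len(s))])
-- ===== Notes on version B (the rewrite author's own statement) =====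
-- stated objective: simpler
-- what changed: Replaces A's incremental three-counter loop with a direct maximum over split points: each split score is recomputed from scratch by the closed form total-ones + 2*(zeros in the prefix) - j (zeros kept left plus ones kept right, with A's convention that every non-zero character counts as a one), clamped below at zero.
import Mathlib
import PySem

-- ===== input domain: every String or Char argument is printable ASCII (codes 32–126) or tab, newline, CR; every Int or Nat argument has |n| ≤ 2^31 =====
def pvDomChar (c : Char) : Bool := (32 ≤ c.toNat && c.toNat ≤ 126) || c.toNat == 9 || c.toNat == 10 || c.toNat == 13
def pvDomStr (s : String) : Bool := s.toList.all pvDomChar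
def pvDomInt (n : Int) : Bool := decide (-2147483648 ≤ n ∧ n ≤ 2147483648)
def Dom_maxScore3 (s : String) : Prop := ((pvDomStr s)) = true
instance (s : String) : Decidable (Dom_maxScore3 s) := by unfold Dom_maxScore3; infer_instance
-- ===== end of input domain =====

-- B replaces A's incremental three-counter loop by a direct maximum over split points,
-- each split's score recomputed from scratch by the closed form ones + 2*zeros(prefix) - j.

-- ===== PORT A =====
def maxScore3 (s : String) : Int :=
  let init : Int × Int × Int := (0, 0, (PySem.Str.count s "1" : Int))
  ((PySem.List.pyRange 0 (PySem.Str.len s - 1) 1).foldl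
    (fun (st : Int × Int × Int) i =>
      let c0 : Int := if PySem.Str.pyGet? s i = some '0' then st.2.1 + 1 else st.2.1
      let c1 : Int := if PySem.Str.pyGet? s i = some '0' then st.2.2 else st.2.2 - 1
      (max st.1 (c0 + c1), c0, c1)) init).1

-- ===== PORT B =====
def maxScore3_alt (s : String) : Int :=
  let ones : Int := (PySem.Str.count s "1" : Int)
  let scores : List Int :=
    (PySem.List.pyRange 1 (PySem.Str.len s) 1).map
      (fun j => ones + 2 * (PySem.Str.count (PySem.Str.slice s none (some j)) "0" : Int) - j)
  match PySem.List.max? ((0 : Int) :: scores) (fun x => x) with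
  | some m => m
  | none => 0  -- unreachable: max is taken of a nonempty list

-- ===== PRECONDITION & SPEC =====
def Spec_maxScore3 (s : String) (out : Int) : Prop := out = maxScore3_alt s
instance (s : String) (out : Int) : Decidable (Spec_maxScore3 s out) := by unfold Spec_maxScore3; infer_instance

-- ===== CLAIM (what is proved, stated in full; the proofs are below) =====
def Claim_equal_maxScore3 : Prop := ∀ (s : String), Dom_maxScore3 s → Spec_maxScore3 s (maxScore3 s)

-- ===== LEMMAS AND PROOFS =====

-- `s.count(c)` for a single character is the list count.
theorem chars_count_go_singleton (c : Char) :
    ∀ (l : List Char) (fuel acc : Nat), l.length ≤ fuel →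
      PySem.Chars.count.go [c] fuel l acc = acc + l.count c := by
  intro l
  induction l with
  | nil =>
      intro fuel acc _
      cases fuel <;> simp [PySem.Chars.count.go]
  | cons x t ih =>
      intro fuel acc h
      cases fuel with
      | zero => simp at h
      | succ f =>
          have hle : t.length ≤ f := by simpa using h
          by_cases hx : c = x
          · subst hx
            have hstep : PySem.Chars.count.go [c] (f + 1) (c :: t) acc
                = PySem.Chars.count.go [c] f t (acc + 1) := by
              simp [PySem.Chars.count.go, List.isPrefixOf]
            rw [hstep, ih f (acc + 1) hle, List.count_cons_self]
            omega
          · have hstep : PySem.Chars.count.go [c] (f + 1) (x :: t) acc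
                = PySem.Chars.count.go [c] f t acc := by
              simp [PySem.Chars.count.go, List.isPrefixOf, hx]
            rw [hstep, ih f acc hle, List.count_cons_of_ne (fun hcontra => hx hcontra.symm)]

theorem chars_count_singleton (l : List Char) (c : Char) :
    PySem.Chars.count l [c] = l.count c := by
  simp [PySem.Chars.count, chars_count_go_singleton c l l.length 0 le_rfl]

-- the score A assigns to the split after position j: total '1's, plus one for each '0'
-- moved to the left part, minus one for each left-part character (every non-'0' counts as a one)
def pvScore (l : List Char) (j : Nat) : Int :=
  (l.count '1' : Int) + 2 * ((l.take j).count '0' : Int) - (j : Int)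

-- invariant of A's loop: after the first k iterations, res is the running max of the
-- first k split scores (seeded with 0), c0 counts '0's seen, c1 is ones minus non-'0's seen.
theorem loopA (l : List Char) (k : Nat) (hk : k ≤ l.length) :
    (PySem.List.pyRange 0 (k : Int) 1).foldl
      (fun (st : Int × Int × Int) i =>
        let c0 : Int := if PySem.List.pyGet? l i = some '0' then st.2.1 + 1 else st.2.1
        let c1 : Int := if PySem.List.pyGet? l i = some '0' then st.2.2 else st.2.2 - 1
        (max st.1 (c0 + c1), c0, c1)) (0, 0, (l.count '1' : Int))
    = (((List.range k).map (fun j => pvScore l (j + 1))).foldl max 0,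
       ((l.take k).count '0' : Int),
       (l.count '1' : Int) - (k : Int) + ((l.take k).count '0' : Int)) := by
  induction k with
  | zero => simp [PySem.List.pyRange_one_eq_nil]
  | succ k ih =>
      have hk' : k ≤ l.length := Nat.le_of_succ_le hk
      have hklt : k < l.length := hk
      have hsplit : PySem.List.pyRange 0 ((k + 1 : Nat) : Int) 1
          = PySem.List.pyRange 0 (k : Int) 1 ++ [(k : Int)] := by
        have := PySem.List.pyRange_one_succ_right (a := 0) (b := (k : Int)) (by positivity)
        simpa [Int.natCast_succ] using this
      have hget : PySem.List.pyGet? l (k : Int) = some l[k] := by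
        simp [List.getElem?_eq_getElem hklt]
      have htake : l.take (k + 1) = l.take k ++ [l[k]] := by
        rw [List.take_add_one, List.getElem?_eq_getElem hklt]; rfl
      have hrange : (List.range (k + 1)).map (fun j => pvScore l (j + 1))
          = (List.range k).map (fun j => pvScore l (j + 1)) ++ [pvScore l (k + 1)] := by
        rw [List.range_succ]; simp
      rw [hsplit, List.foldl_append, ih hk', hrange, List.foldl_append]
      simp only [List.foldl_cons, List.foldl_nil, hget]
      by_cases h0 : l[k] = '0'
      · -- the k-th character is '0': c0 gains one
        have hcond : some l[k] = some '0' := by rw [h0]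
        have hc0 : ((l.take (k + 1)).count '0' : Int) = ((l.take k).count '0' : Int) + 1 := by
          rw [htake, List.count_append, List.count_singleton]
          simp [h0]
        have hscore : ((l.take k).count '0' : Int) + 1
              + ((l.count '1' : Int) - (k : Int) + ((l.take k).count '0' : Int))
            = pvScore l (k + 1) := by
          unfold pvScore; rw [hc0]; push_cast; ring
        simp only [hcond, if_true]
        rw [Prod.mk.injEq, Prod.mk.injEq]
        refine ⟨?_, ?_, ?_⟩
        · rw [hscore]
        · omega
        · push_cast; omega
      · -- the k-th character is not '0': c1 loses one
        have hcond : ¬ (some l[k] = some '0') := by simpa using h0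
        have hc0 : ((l.take (k + 1)).count '0' : Int) = ((l.take k).count '0' : Int) := by
          rw [htake, List.count_append, List.count_singleton]
          simp [h0]
        have hscore : ((l.take k).count '0' : Int)
              + ((l.count '1' : Int) - (k : Int) + ((l.take k).count '0' : Int) - 1)
            = pvScore l (k + 1) := by
          unfold pvScore; rw [hc0]; push_cast; ring
        simp only [if_neg hcond]
        rw [Prod.mk.injEq, Prod.mk.injEq]
        refine ⟨?_, ?_, ?_⟩
        · rw [hscore]
        · omega
        · push_cast; omega

-- B's score list, rewritten over the underlying character list.
theorem scoresB (s : String) :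
    (PySem.List.pyRange 1 (PySem.Str.len s) 1).map
      (fun j => (PySem.Str.count s "1" : Int)
        + 2 * (PySem.Str.count (PySem.Str.slice s none (some j)) "0" : Int) - j)
    = (List.range (s.toList.length - 1)).map (fun j => pvScore s.toList (j + 1)) := by
  rw [PySem.List.pyRange_one, List.map_map]
  have hlen : (PySem.Str.len s - 1).toNat = s.toList.length - 1 := by
    rw [PySem.Str.len_eq]; omega
  rw [hlen]
  apply List.map_congr_left
  intro j _
  have e : (1 : Int) + (j : Int) = ((j + 1 : Nat) : Int) := by push_cast; ring
  simp only [Function.comp_apply, e]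
  rw [PySem.Str.count_eq, PySem.Str.count_eq]
  have h1 : (PySem.Str.slice s none (some ((j + 1 : Nat) : Int))).toList
      = s.toList.take (j + 1) := by
    rw [PySem.Str.toList_slice, PySem.Chars.slice_eq_listSlice, PySem.List.slice_to_natCast]
  rw [h1]
  have c0 : ("0" : String).toList = ['0'] := rfl
  have c1 : ("1" : String).toList = ['1'] := rfl
  rw [c0, c1, chars_count_singleton, chars_count_singleton]
  rfl

-- ===== VERDICT (by name: the statement is the Claim_ definition above) =====
theorem maxScore3_spec : Claim_equal_maxScore3 := by
  intro s _
  unfold Spec_maxScore3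
  have hc1 : (PySem.Str.count s "1" : Int) = (s.toList.count '1' : Int) := by
    rw [PySem.Str.count_eq]
    have h1 : ("1" : String).toList = ['1'] := rfl
    rw [h1, chars_count_singleton]
  have hA : maxScore3 s
      = (((List.range (s.toList.length - 1)).map (fun j => pvScore s.toList (j + 1))).foldl max 0) := by
    rcases Nat.eq_zero_or_pos s.toList.length with h | h
    · simp [maxScore3, h]
    · have hlen : PySem.Str.len s - 1 = ((s.toList.length - 1 : Nat) : Int) := by
        rw [PySem.Str.len_eq]; omega
      have hgets : ∀ i : Int, PySem.Str.pyGet? s i = PySem.List.pyGet? s.toList i := by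
        intro i; simp
      unfold maxScore3
      simp only [hgets, hc1, hlen]
      rw [loopA s.toList (s.toList.length - 1) (Nat.sub_le _ _)]
  have hB : maxScore3_alt s
      = (match PySem.List.max?
            ((0 : Int) ::
              (List.range (s.toList.length - 1)).map (fun j => pvScore s.toList (j + 1)))
            (fun x => x) with
         | some m => m
         | none => 0) := by
    show (match PySem.List.max?
            ((0 : Int) ::
              (PySem.List.pyRange 1 (PySem.Str.len s) 1).map
                (fun j => (PySem.Str.count s "1" : Int)
                  + 2 * (PySem.Str.count (PySem.Str.slice s none (some j)) "0" : Int) - j))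
            (fun x => x) with
          | some m => m
          | none => 0) = _
    rw [scoresB]
  rw [hA, hB, PySem.List.max?_id_cons]
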